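-- pv_equiv track=rewrite | github.com/mind-protocol/context-protocol | src/add_framework/repair.py | parse_decisions_from_output
-- ===== SOURCE A (Python) =====
-- from typing import List, Dict, Any, Optional
--
-- def parse_decisions_from_output(output: str) -> List[Dict[str, str]]:
--     """Parse DECISION items from agent output."""
--     decisions = []
--     lines = output.split('\n')
--
--     current_decision = None
--     for line in lines:
--         stripped = line.strip()
--
--         # Look for DECISION headers
--         if '### DECISION:' in stripped or '### Decision:' in stripped:
--             if current_decision and current_decision.get('name'):
--                 decisions.append(current_decision)
--             name = stripped.split(':', 1)[1].strip() if ':' in stripped else ''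
--             current_decision = {'name': name, 'conflict': '', 'resolution': '', 'reasoning': ''}
--         elif current_decision:
--             lower = stripped.lower()
--             if lower.startswith('- conflict:') or lower.startswith('conflict:'):
--                 current_decision['conflict'] = stripped.split(':', 1)[1].strip()
--             elif lower.startswith('- resolution:') or lower.startswith('resolution:'):
--                 current_decision['resolution'] = stripped.split(':', 1)[1].strip()
--             elif lower.startswith('- reasoning:') or lower.startswith('reasoning:'):
--                 current_decision['reasoning'] = stripped.split(':', 1)[1].strip()
--             elif lower.startswith('- updated:') or lower.startswith('updated:'):
--                 current_decision['updated'] = stripped.split(':', 1)[1].strip()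
--             elif stripped.startswith('###') or stripped.startswith('## '):
--                 # New section, save current decision
--                 if current_decision.get('name'):
--                     decisions.append(current_decision)
--                 current_decision = None
--
--     # Don't forget last decision
--     if current_decision and current_decision.get('name'):
--         decisions.append(current_decision)
--
--     return decisions
-- ===== SOURCE B (Python) =====
-- from typing import List, Dict, Any, Optional
--
-- _FIELD_KEYS = ('conflict', 'resolution', 'reasoning', 'updated')
--
-- def _classify(stripped):
--     """Classify one stripped line: decision header, section break, field line, or plain text."""
--     if '### DECISION:' in stripped or '### Decision:' in stripped:
--         name = stripped.split(':', 1)[1].strip() if ':' in stripped else ''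
--         return ('decision', name)
--     low = stripped.lower()
--     for key in _FIELD_KEYS:
--         if low.startswith('- ' + key + ':') or low.startswith(key + ':'):
--             return ('field', key, stripped.split(':', 1)[1].strip())
--     if stripped.startswith('###') or stripped.startswith('## '):
--         return ('break',)
--     return ('text',)
--
-- def parse_decisions_from_output(output: str) -> List[Dict[str, str]]:
--     """Parse DECISION items from agent output."""
--     tokens = [_classify(line.strip()) for line in output.split('\n')]
--     # Cut the token stream into segments at every header (decision or break).
--     segments = []
--     header, body = None, []
--     for tok in tokens:
--         if tok[0] in ('decision', 'break'):
--             segments.append((header, body))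
--             header, body = tok, []
--         else:
--             body.append(tok)
--     segments.append((header, body))
--     # Each decision-headed segment with a nonempty name yields one dict (last field wins).
--     decisions = []
--     for header, body in segments:
--         if header is not None and header[0] == 'decision' and header[1]:
--             d = {'name': header[1], 'conflict': '', 'resolution': '', 'reasoning': ''}
--             for tok in body:
--                 if tok[0] == 'field':
--                     d[tok[1]] = tok[2]
--             decisions.append(d)
--     return decisions
-- ===== Notes on version B (the rewrite author's own statement) =====
-- stated objective: alternative
-- what changed: Replaces A's single stateful loop with a mutable current-decision dict by a three-phase pipeline: classify every stripped line into a token, cut the token stream into header-delimited segments, then build one dict per DECISION-headed segment from its body tokens.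
import Mathlib
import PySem

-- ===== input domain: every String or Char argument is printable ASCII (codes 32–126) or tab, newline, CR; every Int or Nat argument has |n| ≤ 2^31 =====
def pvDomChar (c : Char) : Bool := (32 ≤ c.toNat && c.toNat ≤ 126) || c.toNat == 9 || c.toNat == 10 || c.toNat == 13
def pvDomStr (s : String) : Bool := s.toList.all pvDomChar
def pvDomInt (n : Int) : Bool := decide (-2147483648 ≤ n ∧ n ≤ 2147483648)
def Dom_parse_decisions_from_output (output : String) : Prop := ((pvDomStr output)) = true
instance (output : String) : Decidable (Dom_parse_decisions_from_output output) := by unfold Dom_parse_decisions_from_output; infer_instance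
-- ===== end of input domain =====

-- B replaces A's single stateful loop with a classify-then-segment-then-build pipeline (same cost; objective: alternative decomposition).

-- ===== PORT A =====
-- stripped.split(':', 1)[1].strip()  (used only when ':' is in stripped, so index 1 exists)
def pvTailAfterColon (stripped : String) : String :=
  PySem.Str.strip ((((PySem.Str.splitMax? stripped ":" 1).getD []).getD 1 ""))

-- one iteration of A's `for line in lines` loop; state = (decisions, current_decision)
def pvStepA (st : List (PySem.Dict String String) × Option (PySem.Dict String String))
    (line : String) : List (PySem.Dict String String) × Option (PySem.Dict String String) :=
  let stripped := PySem.Str.strip line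
  if PySem.Str.isIn "### DECISION:" stripped || PySem.Str.isIn "### Decision:" stripped then
    let decisions :=
      match st.2 with
      | some cur => if PySem.Dict.getD cur "name" "" ≠ "" then st.1 ++ [cur] else st.1
      | none => st.1
    let name := if PySem.Str.isIn ":" stripped then pvTailAfterColon stripped else ""
    (decisions, some (PySem.Dict.ofList [("name", name), ("conflict", ""), ("resolution", ""), ("reasoning", "")]))
  else
    match st.2 with
    | some cur =>
      let lower := PySem.Str.lower stripped
      if PySem.Str.startswith lower "- conflict:" || PySem.Str.startswith lower "conflict:" then
        (st.1, some (cur.insert "conflict" (pvTailAfterColon stripped)))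
      else if PySem.Str.startswith lower "- resolution:" || PySem.Str.startswith lower "resolution:" then
        (st.1, some (cur.insert "resolution" (pvTailAfterColon stripped)))
      else if PySem.Str.startswith lower "- reasoning:" || PySem.Str.startswith lower "reasoning:" then
        (st.1, some (cur.insert "reasoning" (pvTailAfterColon stripped)))
      else if PySem.Str.startswith lower "- updated:" || PySem.Str.startswith lower "updated:" then
        (st.1, some (cur.insert "updated" (pvTailAfterColon stripped)))
      else if PySem.Str.startswith stripped "###" || PySem.Str.startswith stripped "## " then
        (if PySem.Dict.getD cur "name" "" ≠ "" then st.1 ++ [cur] else st.1, none)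
      else
        st
    | none => st

def parse_decisions_from_output (output : String) : List (List (String × String)) :=
  let lines := (PySem.Str.split? output "\n").getD []
  let r := lines.foldl pvStepA ([], none)
  let decisions :=
    match r.2 with
    | some cur => if PySem.Dict.getD cur "name" "" ≠ "" then r.1 ++ [cur] else r.1
    | none => r.1
  decisions.map PySem.Dict.items

-- ===== PORT B =====
inductive PvTok where
  | decision : String → PvTok
  | brk : PvTok
  | field : String → String → PvTok
  | text : PvTok
deriving DecidableEq, Repr

-- port of _classify (the `for key in _FIELD_KEYS` loop unrolled over the four literal keys)
def pvClassify (stripped : String) : PvTok :=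
  if PySem.Str.isIn "### DECISION:" stripped || PySem.Str.isIn "### Decision:" stripped then
    PvTok.decision (if PySem.Str.isIn ":" stripped then pvTailAfterColon stripped else "")
  else
    let low := PySem.Str.lower stripped
    if PySem.Str.startswith low "- conflict:" || PySem.Str.startswith low "conflict:" then
      PvTok.field "conflict" (pvTailAfterColon stripped)
    else if PySem.Str.startswith low "- resolution:" || PySem.Str.startswith low "resolution:" then
      PvTok.field "resolution" (pvTailAfterColon stripped)
    else if PySem.Str.startswith low "- reasoning:" || PySem.Str.startswith low "reasoning:" then
      PvTok.field "reasoning" (pvTailAfterColon stripped)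
    else if PySem.Str.startswith low "- updated:" || PySem.Str.startswith low "updated:" then
      PvTok.field "updated" (pvTailAfterColon stripped)
    else if PySem.Str.startswith stripped "###" || PySem.Str.startswith stripped "## " then
      PvTok.brk
    else
      PvTok.text

-- one iteration of B's segmentation loop; state = (segments, header, body)
def pvGroupStep (st : List (Option PvTok × List PvTok) × Option PvTok × List PvTok) (t : PvTok) :
    List (Option PvTok × List PvTok) × Option PvTok × List PvTok :=
  match t with
  | PvTok.decision _ => (st.1 ++ [(st.2.1, st.2.2)], some t, [])
  | PvTok.brk => (st.1 ++ [(st.2.1, st.2.2)], some t, [])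
  | _ => (st.1, st.2.1, st.2.2 ++ [t])

-- build one decision dict from a segment body (last field wins)
def pvBuildDict (name : String) (body : List PvTok) : PySem.Dict String String :=
  body.foldl
    (fun d t => match t with | PvTok.field k v => d.insert k v | _ => d)
    (PySem.Dict.ofList [("name", name), ("conflict", ""), ("resolution", ""), ("reasoning", "")])

-- B's final loop over segments
def pvProcSeg (acc : List (PySem.Dict String String)) (seg : Option PvTok × List PvTok) :
    List (PySem.Dict String String) :=
  match seg.1 with
  | some (PvTok.decision name) => if name ≠ "" then acc ++ [pvBuildDict name seg.2] else acc
  | _ => acc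

def parse_decisions_from_output_alt (output : String) : List (List (String × String)) :=
  let toks := ((PySem.Str.split? output "\n").getD []).map (fun line => pvClassify (PySem.Str.strip line))
  let g := toks.foldl pvGroupStep ([], none, [])
  let segments := g.1 ++ [(g.2.1, g.2.2)]
  (segments.foldl pvProcSeg []).map PySem.Dict.items

-- ===== PRECONDITION & SPEC =====
def Spec_parse_decisions_from_output (output : String) (out : List (List (String × String))) : Prop := out = parse_decisions_from_output_alt output
instance (output : String) (out : List (List (String × String))) : Decidable (Spec_parse_decisions_from_output output out) := by unfold Spec_parse_decisions_from_output; infer_instance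

-- ===== CLAIM (what is proved, stated in full; the proofs are below) =====
def Claim_equal_parse_decisions_from_output : Prop := ∀ (output : String), Dom_parse_decisions_from_output output → Spec_parse_decisions_from_output output (parse_decisions_from_output output)

-- ===== LEMMAS AND PROOFS =====

-- a field token never carries the key "name" (classify only emits the four literal keys)
def pvTokOK : PvTok → Prop
  | PvTok.field k _ => k ≠ "name"
  | _ => True

lemma pvClassify_ok (s : String) : pvTokOK (pvClassify s) := by
  simp only [pvClassify]
  split_ifs <;> simp [pvTokOK]

-- A's step, expressed as a function of the classified token
def pvClose (decs : List (PySem.Dict String String)) (cur : Option (PySem.Dict String String)) :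
    List (PySem.Dict String String) :=
  match cur with
  | some d => if PySem.Dict.getD d "name" "" ≠ "" then decs ++ [d] else decs
  | none => decs

def pvStepTok (st : List (PySem.Dict String String) × Option (PySem.Dict String String))
    (t : PvTok) : List (PySem.Dict String String) × Option (PySem.Dict String String) :=
  match t with
  | PvTok.decision name =>
      (pvClose st.1 st.2,
       some (PySem.Dict.ofList [("name", name), ("conflict", ""), ("resolution", ""), ("reasoning", "")]))
  | PvTok.brk =>
      match st.2 with
      | some cur => (pvClose st.1 (some cur), none)
      | none => st
  | PvTok.field k v =>
      match st.2 with
      | some cur => (st.1, some (cur.insert k v))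
      | none => st
  | PvTok.text => st

set_option maxHeartbeats 2000000 in
lemma pvStepA_eq_stepTok (st : List (PySem.Dict String String) × Option (PySem.Dict String String))
    (line : String) : pvStepA st line = pvStepTok st (pvClassify (PySem.Str.strip line)) := by
  obtain ⟨decs, cur⟩ := st
  cases cur <;>
    · simp only [pvStepA, pvClassify, pvStepTok, pvClose]
      split_ifs <;> rfl

-- abstraction of B's in-progress segmentation state into A's loop state
def pvMat (hd : Option PvTok) (body : List PvTok) : Option (PySem.Dict String String) :=
  match hd with
  | some (PvTok.decision name) => some (pvBuildDict name body)
  | _ => none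

lemma pvBuildDict_getD_name (name : String) (body : List PvTok)
    (hok : ∀ t ∈ body, pvTokOK t) :
    PySem.Dict.getD (pvBuildDict name body) "name" "" = name := by
  unfold pvBuildDict
  suffices h : ∀ (d : PySem.Dict String String),
      PySem.Dict.getD (body.foldl (fun d t => match t with | PvTok.field k v => d.insert k v | _ => d) d) "name" ""
        = PySem.Dict.getD d "name" "" by
    rw [h]
    simp [PySem.Dict.ofList, PySem.Dict.update, PySem.Dict.getD, PySem.Dict.get?_insert_of_ne,
      PySem.Dict.get?_insert_self]
  induction body with
  | nil => intro d; rfl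
  | cons t rest ih =>
    intro d
    have hok' : ∀ t ∈ rest, pvTokOK t := fun t ht => hok t (List.mem_cons_of_mem _ ht)
    cases t with
    | field k v =>
      have hk : k ≠ "name" := hok _ (List.mem_cons_self)
      simp only [List.foldl_cons]
      rw [ih hok']
      rw [PySem.Dict.getD_insert]
      simp [Ne.symm hk]
    | decision n => simpa using ih hok' (d := d)
    | brk => simpa using ih hok' (d := d)
    | text => simpa using ih hok' (d := d)

lemma pvClose_mat (segs : List (Option PvTok × List PvTok)) (hd : Option PvTok) (body : List PvTok)
    (hbody : ∀ t ∈ body, pvTokOK t) :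
    pvClose (segs.foldl pvProcSeg []) (pvMat hd body)
      = (segs ++ [(hd, body)]).foldl pvProcSeg [] := by
  rw [List.foldl_append]
  cases hd with
  | none => rfl
  | some t =>
    cases t with
    | decision name =>
      simp only [pvMat, pvClose, pvProcSeg, List.foldl_cons, List.foldl_nil]
      rw [pvBuildDict_getD_name name body hbody]
    | brk => rfl
    | field k v => rfl
    | text => rfl

lemma pvMain (toks : List PvTok) (hok : ∀ t ∈ toks, pvTokOK t) :
    ∀ (segs : List (Option PvTok × List PvTok)) (hd : Option PvTok) (body : List PvTok),
      (∀ t ∈ body, pvTokOK t) →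
      pvClose (toks.foldl pvStepTok (segs.foldl pvProcSeg [], pvMat hd body)).1
        (toks.foldl pvStepTok (segs.foldl pvProcSeg [], pvMat hd body)).2
      = (let g := toks.foldl pvGroupStep (segs, hd, body);
         (g.1 ++ [(g.2.1, g.2.2)]).foldl pvProcSeg []) := by
  induction toks with
  | nil =>
    intro segs hd body hbody
    simpa using pvClose_mat segs hd body hbody
  | cons t rest ih =>
    intro segs hd body hbody
    have hok_rest : ∀ t ∈ rest, pvTokOK t := fun t ht => hok t (List.mem_cons_of_mem _ ht)
    have ih' := fun segs hd body hb => ih hok_rest segs hd body hb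
    cases t with
    | decision name =>
      simp only [List.foldl_cons, pvStepTok, pvGroupStep]
      have h1 : pvClose (segs.foldl pvProcSeg []) (pvMat hd body)
          = ((segs ++ [(hd, body)]).foldl pvProcSeg []) := pvClose_mat segs hd body hbody
      rw [h1]
      have h2 : (some (PySem.Dict.ofList [("name", name), ("conflict", ""), ("resolution", ""), ("reasoning", "")]) : Option (PySem.Dict String String))
          = pvMat (some (PvTok.decision name)) [] := rfl
      rw [h2]
      exact ih' (segs ++ [(hd, body)]) (some (PvTok.decision name)) [] (by simp)
    | brk =>
      simp only [List.foldl_cons, pvGroupStep]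
      have h1 : pvStepTok (segs.foldl pvProcSeg [], pvMat hd body) PvTok.brk
          = (pvClose (segs.foldl pvProcSeg []) (pvMat hd body), pvMat (some PvTok.brk) []) := by
        cases hd with
        | none => rfl
        | some t => cases t <;> rfl
      rw [h1, pvClose_mat segs hd body hbody]
      exact ih' (segs ++ [(hd, body)]) (some PvTok.brk) [] (by simp)
    | field k v =>
      simp only [List.foldl_cons, pvGroupStep]
      have h1 : pvStepTok (segs.foldl pvProcSeg [], pvMat hd body) (PvTok.field k v)
          = (segs.foldl pvProcSeg [], pvMat hd (body ++ [PvTok.field k v])) := by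
        cases hd with
        | none => rfl
        | some t =>
          cases t with
          | decision n =>
            simp only [pvStepTok, pvMat, pvBuildDict, List.foldl_append, List.foldl_cons, List.foldl_nil]
          | brk => rfl
          | field k' v' => rfl
          | text => rfl
      rw [h1]
      refine ih' segs hd (body ++ [PvTok.field k v]) ?_
      intro t ht
      rcases List.mem_append.1 ht with h | h
      · exact hbody t h
      · simp at h; subst h; exact hok _ (List.mem_cons_self)
    | text =>
      simp only [List.foldl_cons, pvGroupStep]
      have h1 : pvStepTok (segs.foldl pvProcSeg [], pvMat hd body) PvTok.text
          = (segs.foldl pvProcSeg [], pvMat hd (body ++ [PvTok.text])) := by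
        cases hd with
        | none => rfl
        | some t =>
          cases t with
          | decision n =>
            simp only [pvStepTok, pvMat, pvBuildDict, List.foldl_append, List.foldl_cons, List.foldl_nil]
          | brk => rfl
          | field k' v' => rfl
          | text => rfl
      rw [h1]
      refine ih' segs hd (body ++ [PvTok.text]) ?_
      intro t ht
      rcases List.mem_append.1 ht with h | h
      · exact hbody t h
      · simp at h; subst h; trivial

lemma pvFoldA_eq (lines : List String)
    (st : List (PySem.Dict String String) × Option (PySem.Dict String String)) :
    lines.foldl pvStepA st
      = lines.foldl (fun st line => pvStepTok st (pvClassify (PySem.Str.strip line))) st := by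
  induction lines generalizing st with
  | nil => rfl
  | cons l rest ih => simp only [List.foldl_cons, pvStepA_eq_stepTok, ih]

-- ===== VERDICT (by name: the statement is the Claim_ definition above) =====
theorem parse_decisions_from_output_spec : Claim_equal_parse_decisions_from_output := by
  intro output _
  unfold Spec_parse_decisions_from_output
  simp only [parse_decisions_from_output, parse_decisions_from_output_alt]
  set lines := (PySem.Str.split? output "\n").getD [] with hlines
  have hfold : lines.foldl pvStepA ([], none)
      = (lines.map (fun line => pvClassify (PySem.Str.strip line))).foldl pvStepTok ([], none) := by
    rw [List.foldl_map]
    exact pvFoldA_eq lines ([], none)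
  set toks := lines.map (fun line => pvClassify (PySem.Str.strip line)) with htoks
  have hok : ∀ t ∈ toks, pvTokOK t := by
    intro t ht
    rw [htoks] at ht
    rcases List.mem_map.1 ht with ⟨l, _, rfl⟩
    exact pvClassify_ok _
  have hmain := pvMain toks hok [] none [] (by simp)
  simp only [pvMat, List.foldl_nil] at hmain
  rw [hfold]
  have hfinal : (match (toks.foldl pvStepTok ([], none)).2 with
      | some cur => if PySem.Dict.getD cur "name" "" ≠ "" then (toks.foldl pvStepTok ([], none)).1 ++ [cur] else (toks.foldl pvStepTok ([], none)).1
      | none => (toks.foldl pvStepTok ([], none)).1)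
      = pvClose (toks.foldl pvStepTok ([], none)).1 (toks.foldl pvStepTok ([], none)).2 := rfl
  rw [hfinal, hmain]
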